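-- pv_equiv track=rewrite | github.com/RevesK1ng/reverscodes | code_validator.py | deduplicate_codes
-- ===== SOURCE A (Python) =====
-- from typing import List, Dict, Optional, Tuple, Set
--
-- def deduplicate_codes(codes_list: List[Dict]) -> List[Dict]:
--     """Remove duplicate codes while preserving the best quality entry."""
--     seen_codes = {}
--
--     for code_data in codes_list:
--         code = code_data.get('code', '').upper()
--
--         if code not in seen_codes:
--             seen_codes[code] = code_data
--         else:
--             # Keep the one with better reward description
--             existing = seen_codes[code]
--             if len(code_data.get('reward', '')) > len(existing.get('reward', '')):
--                 seen_codes[code] = code_data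
--
--     return list(seen_codes.values())
-- ===== SOURCE B (Python) =====
-- def deduplicate_codes(codes_list):
--     """Remove duplicate codes while preserving the best quality entry."""
--     pairs = [(cd.get('code', '').upper(), cd) for cd in codes_list]
--     groups = {}
--     for key, cd in pairs:
--         groups.setdefault(key, []).append(cd)
--     return [max(group, key=lambda d: len(d.get('reward', '')))
--             for group in groups.values()]
-- ===== Notes on version B (the rewrite author's own statement) =====
-- stated objective: alternative
-- what changed: B separates concerns: one pass groups entries by uppercased code into an ordered dict of lists, then a comprehension picks max(group, key=reward length) per group, instead of A's single pass that maintains a running best entry per code inline.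
import Mathlib
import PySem

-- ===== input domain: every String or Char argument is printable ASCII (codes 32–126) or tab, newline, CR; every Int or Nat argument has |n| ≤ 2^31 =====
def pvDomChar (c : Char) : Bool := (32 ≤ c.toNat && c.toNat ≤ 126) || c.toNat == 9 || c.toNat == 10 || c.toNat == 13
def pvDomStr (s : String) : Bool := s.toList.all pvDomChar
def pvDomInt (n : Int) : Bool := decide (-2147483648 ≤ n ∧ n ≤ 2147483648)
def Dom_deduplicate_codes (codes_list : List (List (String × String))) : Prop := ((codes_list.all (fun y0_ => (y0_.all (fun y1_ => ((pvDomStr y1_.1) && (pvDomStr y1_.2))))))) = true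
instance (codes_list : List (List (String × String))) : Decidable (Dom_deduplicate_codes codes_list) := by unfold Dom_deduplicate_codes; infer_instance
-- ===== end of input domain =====

-- B groups entries by uppercased code into an ordered dict of lists and then picks the
-- longest-reward entry per group, instead of A's inline running-best dict; same cost, proved equal.


-- shared helper: Python's code_data.get(k, dflt) on a dict given as an association list (first match)
def pvEntryGet (cd : List (String × String)) (k dflt : String) : String :=
  (PySem.Dict.mk cd).getD k dflt

-- ===== PORT A =====
def deduplicate_codes (codes_list : List (List (String × String))) : List (List (String × String)) :=
  (codes_list.foldl
    (fun seen cd =>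
      let code := PySem.Str.upper (pvEntryGet cd "code" "")
      if seen.contains code = false then
        seen.insert code cd
      else
        let existing := seen.getD code []
        if PySem.Str.len (pvEntryGet cd "reward" "") > PySem.Str.len (pvEntryGet existing "reward" "") then
          seen.insert code cd
        else
          seen)
    (PySem.Dict.empty : PySem.Dict String (List (String × String)))).values

-- ===== PORT B =====
def deduplicate_codes_alt (codes_list : List (List (String × String))) : List (List (String × String)) :=
  let pairs := codes_list.map (fun cd => (PySem.Str.upper (pvEntryGet cd "code" ""), cd))
  let groups := pairs.foldl
    (fun d p => d.modify p.1 [] (fun g => g ++ [p.2]))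
    (PySem.Dict.empty : PySem.Dict String (List (List (String × String))))
  groups.values.map
    (fun group => PySem.List.maxD group (fun d => PySem.Str.len (pvEntryGet d "reward" "")) [])

-- ===== PRECONDITION & SPEC =====
def Spec_deduplicate_codes (codes_list : List (List (String × String))) (out : List (List (String × String))) : Prop := out = deduplicate_codes_alt codes_list
instance (codes_list : List (List (String × String))) (out : List (List (String × String))) : Decidable (Spec_deduplicate_codes codes_list out) := by unfold Spec_deduplicate_codes; infer_instance

-- ===== CLAIM (what is proved, stated in full; the proofs are below) =====
def Claim_equal_deduplicate_codes : Prop := ∀ (codes_list : List (List (String × String))), Dom_deduplicate_codes codes_list → Spec_deduplicate_codes codes_list (deduplicate_codes codes_list)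

-- ===== LEMMAS AND PROOFS =====

-- abbreviations used only by the proofs
def pvKey (cd : List (String × String)) : String := PySem.Str.upper (pvEntryGet cd "code" "")
def pvRlen (cd : List (String × String)) : Int := PySem.Str.len (pvEntryGet cd "reward" "")
def pvPick (g : List (List (String × String))) : List (String × String) :=
  PySem.List.maxD g pvRlen []

-- A's loop body
def pvStepA (seen : PySem.Dict String (List (String × String))) (cd : List (String × String)) :
    PySem.Dict String (List (String × String)) :=
  if seen.contains (pvKey cd) = false then
    seen.insert (pvKey cd) cd
  else
    if pvRlen cd > pvRlen (seen.getD (pvKey cd) []) then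
      seen.insert (pvKey cd) cd
    else
      seen

-- the accumulator step of PySem.List.max? with key pvRlen
def pvComb (acc : Option (List (String × String))) (cd : List (String × String)) :
    Option (List (String × String)) :=
  match acc with
  | none => some cd
  | some m => if pvRlen m < pvRlen cd then some cd else some m

lemma max?_eq_foldl_pvComb (xs : List (List (String × String))) :
    PySem.List.max? xs pvRlen = xs.foldl pvComb none := by
  unfold PySem.List.max?
  congr 1
  funext acc cd
  cases acc <;> rfl

lemma stepA_get? (seen : PySem.Dict String (List (String × String))) (cd : List (String × String))
    (c : String) :
    (pvStepA seen cd).get? c = if pvKey cd == c then pvComb (seen.get? c) cd else seen.get? c := by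
  unfold pvStepA
  by_cases hc : seen.contains (pvKey cd) = false
  · simp only [hc, if_true]
    by_cases h : pvKey cd = c
    · subst h
      have hn : seen.get? (pvKey cd) = none :=
        (PySem.Dict.get?_eq_none_iff_contains seen _).mpr hc
      rw [PySem.Dict.get?_insert_self, hn]
      simp [pvComb]
    · rw [PySem.Dict.get?_insert_of_ne seen cd (fun hh => h hh.symm)]
      have hbe : (pvKey cd == c) = false := by simp [h]
      rw [hbe]
      simp
  · have hc' : seen.contains (pvKey cd) = true := by
      revert hc; cases seen.contains (pvKey cd) <;> simp
    rcases h' : seen.get? (pvKey cd) with _ | ex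
    · rw [PySem.Dict.get?_eq_none_iff_contains seen _] at h'
      rw [hc'] at h'; cases h'
    have hgd : seen.getD (pvKey cd) [] = ex := PySem.Dict.getD_of_get?_eq_some seen [] h'
    simp only [hc', Bool.true_eq_false, if_false, hgd]
    by_cases h : pvKey cd = c
    · subst h
      rw [h']
      simp only [beq_self_eq_true, if_true]
      by_cases hlt : pvRlen cd > pvRlen ex
      · rw [if_pos hlt, PySem.Dict.get?_insert_self]
        simp [pvComb, hlt]
      · rw [if_neg hlt, h']
        simp only [pvComb]
        rw [if_neg (by exact hlt)]
    · have hbe : (pvKey cd == c) = false := by simp [h]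
      rw [hbe]
      by_cases hlt : pvRlen cd > pvRlen ex
      · rw [if_pos hlt, PySem.Dict.get?_insert_of_ne seen cd (fun hh => h hh.symm)]
        simp
      · rw [if_neg hlt]
        simp

lemma stepA_keys (seen : PySem.Dict String (List (String × String))) (cd : List (String × String)) :
    (pvStepA seen cd).keys = (seen.insert (pvKey cd) cd).keys := by
  unfold pvStepA
  by_cases hc : seen.contains (pvKey cd) = false
  · simp [hc]
  · have hc' : seen.contains (pvKey cd) = true := by
      revert hc; cases seen.contains (pvKey cd) <;> simp
    simp only [hc', Bool.true_eq_false, if_false]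
    by_cases hlt : pvRlen cd > pvRlen (seen.getD (pvKey cd) [])
    · simp [hlt]
    · simp [hlt, PySem.Dict.keys_insert_of_contains seen cd hc']

lemma foldA_get? (l : List (List (String × String)))
    (seen : PySem.Dict String (List (String × String))) (c : String) :
    (l.foldl pvStepA seen).get? c =
      (l.filter (fun cd => pvKey cd == c)).foldl pvComb (seen.get? c) := by
  induction l generalizing seen with
  | nil => rfl
  | cons cd t ih =>
    simp only [List.foldl_cons, List.filter_cons]
    rw [ih, stepA_get? seen cd c]
    by_cases h : pvKey cd == c
    · simp [h]
    · simp [h]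

lemma foldA_keys (l : List (List (String × String)))
    (seen : PySem.Dict String (List (String × String)))
    (d : PySem.Dict String (List (List (String × String))))
    (h : seen.keys = d.keys) :
    (l.foldl pvStepA seen).keys =
      (l.foldl (fun d cd => d.modify (pvKey cd) [] (fun g => g ++ [cd])) d).keys := by
  induction l generalizing seen d with
  | nil => exact h
  | cons cd t ih =>
    simp only [List.foldl_cons]
    apply ih
    rw [stepA_keys, PySem.Dict.keys_modify]
    have hcon : seen.contains (pvKey cd) = d.contains (pvKey cd) := by
      rw [PySem.Dict.contains_eq_decide_mem_keys, PySem.Dict.contains_eq_decide_mem_keys, h]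
    by_cases hc : seen.contains (pvKey cd) = true
    · rw [PySem.Dict.keys_insert_of_contains seen cd hc,
        PySem.Dict.keys_insert_of_contains d _ (hcon ▸ hc), h]
    · have hc1 : seen.contains (pvKey cd) = false := by
        revert hc; cases seen.contains (pvKey cd) <;> simp
      rw [PySem.Dict.keys_insert_of_not_contains seen cd hc1,
        PySem.Dict.keys_insert_of_not_contains d _ (hcon ▸ hc1), h]

lemma foldA_nodup (l : List (List (String × String)))
    (seen : PySem.Dict String (List (String × String))) (h : seen.keys.Nodup) :
    (l.foldl pvStepA seen).keys.Nodup := by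
  induction l generalizing seen with
  | nil => exact h
  | cons cd t ih =>
    simp only [List.foldl_cons]
    apply ih
    unfold pvStepA
    split_ifs <;> first | exact PySem.Dict.nodup_keys_insert _ _ _ h | exact h

-- ===== VERDICT (by name: the statement is the Claim_ definition above) =====
theorem deduplicate_codes_spec : Claim_equal_deduplicate_codes := by
  intro l _
  unfold Spec_deduplicate_codes
  have hA : deduplicate_codes l =
      (l.foldl pvStepA (PySem.Dict.empty : PySem.Dict String (List (String × String)))).values := rfl
  have hB : deduplicate_codes_alt l =
      ((l.foldl (fun d cd => d.modify (pvKey cd) [] (fun g => g ++ [cd]))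
        (PySem.Dict.empty : PySem.Dict String (List (List (String × String))))).values).map pvPick := by
    simp only [deduplicate_codes_alt, List.foldl_map]
    rfl
  rw [hA, hB]
  set seenF := l.foldl pvStepA (PySem.Dict.empty : PySem.Dict String (List (String × String))) with hseen
  set groupsF := l.foldl (fun d cd => d.modify (pvKey cd) [] (fun g => g ++ [cd]))
      (PySem.Dict.empty : PySem.Dict String (List (List (String × String)))) with hgroups
  have hndA : seenF.keys.Nodup := foldA_nodup l _ (by simp)
  have hndG : groupsF.keys.Nodup :=
    PySem.Dict.nodup_keys_foldl_modify_key l pvKey [] (fun _ cd => fun g => g ++ [cd])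
      PySem.Dict.empty (by simp)
  have hkeys : seenF.keys = groupsF.keys := foldA_keys l _ _ rfl
  rw [PySem.Dict.values_eq_map_keys seenF hndA [],
      PySem.Dict.values_eq_map_keys groupsF hndG [], hkeys, List.map_map]
  apply List.map_congr_left
  intro c _
  have hAc : seenF.getD c [] =
      (PySem.List.max? (l.filter (fun cd => pvKey cd == c)) pvRlen).getD [] := by
    rw [PySem.Dict.getD_eq_get?_getD, hseen, foldA_get?, max?_eq_foldl_pvComb]
    rfl
  have hGc : groupsF.getD c [] = l.filter (fun cd => pvKey cd == c) := by
    have hpair := PySem.Dict.getD_foldl_modify_append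
      (l.map (fun cd => (pvKey cd, cd)))
      (PySem.Dict.empty : PySem.Dict String (List (List (String × String)))) c
    rw [List.foldl_map] at hpair
    rw [hgroups, hpair]
    simp [List.filter_map, Function.comp_def]
  simp only [Function.comp]
  rw [hAc, hGc]
  rfl
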